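-- pv_equiv track=rewrite | github.com/ermantatar/Algorithms | Python/_____COMPANY_LIST_____/PAST_INTERVIEWS/ShopCanal.py | is_half_isomorphic
-- ===== SOURCE A (Python) =====
-- def is_half_isomorphic(s1, s2):
--   if len(s1) != len(s2):
--     return False
--   mapping = {}
--   for i in range(len(s1)):
--     if s1[i] in mapping:
--       if mapping[s1[i]] != s2[i]:
--         return False
--       continue
--     mapping[s1[i]] = s2[i]
--   return True
-- ===== SOURCE B (Python) =====
-- def is_half_isomorphic(s1, s2):
--   if len(s1) != len(s2):
--     return False
--   return len(set(zip(s1, s2))) == len(set(s1))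
-- ===== Notes on version B (the rewrite author's own statement) =====
-- stated objective: simpler
-- what changed: Replaces the incremental mapping dict with early exit by a counting argument: after the length guard, B returns whether the number of distinct (s1[i], s2[i]) pairs equals the number of distinct s1 characters (set building in C beats the per-char Python-level dict loop).
import Mathlib
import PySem

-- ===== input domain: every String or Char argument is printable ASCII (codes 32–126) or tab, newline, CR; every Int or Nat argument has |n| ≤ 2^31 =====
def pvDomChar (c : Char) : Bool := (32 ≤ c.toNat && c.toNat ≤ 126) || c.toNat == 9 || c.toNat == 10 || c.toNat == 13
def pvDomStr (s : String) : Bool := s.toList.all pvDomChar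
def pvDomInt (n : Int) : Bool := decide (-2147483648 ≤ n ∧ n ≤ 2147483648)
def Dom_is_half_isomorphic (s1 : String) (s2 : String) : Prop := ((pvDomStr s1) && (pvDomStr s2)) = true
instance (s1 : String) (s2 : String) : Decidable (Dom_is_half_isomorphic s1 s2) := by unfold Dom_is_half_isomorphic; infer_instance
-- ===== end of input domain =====

-- B replaces A's incremental mapping dict (with early exit) by a distinct-count comparison:
-- #distinct (s1[i], s2[i]) pairs = #distinct s1 chars; objective: simpler.

-- ===== PORT A =====
-- the for-loop over i in range(len(s1)), walking both char lists in step with the mapping dict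
def isHalfLoopA : List Char → List Char → PySem.Dict Char Char → Bool
  | c1 :: t1, c2 :: t2, m =>
      match m.get? c1 with
      | some v => if v ≠ c2 then false else isHalfLoopA t1 t2 m
      | none => isHalfLoopA t1 t2 (m.insert c1 c2)
  | _, _, _ => true

def is_half_isomorphic (s1 : String) (s2 : String) : Bool :=
  if PySem.Str.len s1 ≠ PySem.Str.len s2 then false
  else isHalfLoopA s1.toList s2.toList PySem.Dict.empty

-- ===== PORT B =====
def is_half_isomorphic_alt (s1 : String) (s2 : String) : Bool :=
  if PySem.Str.len s1 ≠ PySem.Str.len s2 then false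
  else PySem.Set.len (PySem.Set.ofList (s1.toList.zip s2.toList)) ==
       PySem.Set.len (PySem.Set.ofList s1.toList)

-- ===== PRECONDITION & SPEC =====
def Spec_is_half_isomorphic (s1 : String) (s2 : String) (out : Bool) : Prop := out = is_half_isomorphic_alt s1 s2
instance (s1 : String) (s2 : String) (out : Bool) : Decidable (Spec_is_half_isomorphic s1 s2 out) := by unfold Spec_is_half_isomorphic; infer_instance

-- ===== CLAIM (what is proved, stated in full; the proofs are below) =====
def Claim_equal_is_half_isomorphic : Prop := ∀ (s1 : String) (s2 : String), Dom_is_half_isomorphic s1 s2 → Spec_is_half_isomorphic s1 s2 (is_half_isomorphic s1 s2)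

-- ===== LEMMAS AND PROOFS =====

-- the zipped pair list is "functional": equal sources always carry equal targets
def PairFun (zs : List (Char × Char)) : Prop :=
  ∀ p ∈ zs, ∀ q ∈ zs, p.1 = q.1 → p.2 = q.2

theorem isHalfLoopA_iff (l1 l2 : List Char) (m : PySem.Dict Char Char) :
    isHalfLoopA l1 l2 m = true ↔
      ((∀ p ∈ l1.zip l2, ∀ c, m.get? p.1 = some c → c = p.2) ∧ PairFun (l1.zip l2)) := by
  induction l1 generalizing l2 m with
  | nil =>
      simp [isHalfLoopA, PairFun]
  | cons a t1 ih =>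
      cases l2 with
      | nil => simp [isHalfLoopA, PairFun]
      | cons b t2 =>
        simp only [List.zip_cons_cons]
        cases hm : m.get? a with
        | some v =>
          unfold isHalfLoopA
          rw [hm]
          show (if v ≠ b then false else isHalfLoopA t1 t2 m) = true ↔ _
          by_cases hv : v = b
          · subst hv
            rw [if_neg (by simp), ih]
            constructor
            · rintro ⟨hc, hf⟩
              constructor
              · rintro p hp c hgc
                rcases List.mem_cons.mp hp with rfl | hp
                · have hgc' : m.get? a = some c := hgc
                  rw [hm] at hgc'
                  injection hgc' with h
                  exact h.symm
                · exact hc p hp c hgc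
              · rintro p hp q hq he
                rcases List.mem_cons.mp hp with rfl | hp <;>
                  rcases List.mem_cons.mp hq with rfl | hq
                · rfl
                · have ha : a = q.1 := he
                  exact show v = q.2 from hc q hq v (by rw [← ha]; exact hm)
                · have ha : p.1 = a := he
                  exact show p.2 = v from (hc p hp v (by rw [ha]; exact hm)).symm
                · exact hf p hp q hq he
            · rintro ⟨hc, hf⟩
              exact ⟨fun p hp => hc p (List.mem_cons_of_mem _ hp),
                fun p hp q hq => hf p (List.mem_cons_of_mem _ hp) q (List.mem_cons_of_mem _ hq)⟩
          · rw [if_pos hv]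
            constructor
            · intro h; exact absurd h (by simp)
            · rintro ⟨hc, -⟩
              exact (hv (hc (a, b) List.mem_cons_self v hm)).elim
        | none =>
          unfold isHalfLoopA
          rw [hm]
          show isHalfLoopA t1 t2 (m.insert a b) = true ↔ _
          rw [ih]
          constructor
          · rintro ⟨hc, hf⟩
            constructor
            · rintro p hp c hgc
              rcases List.mem_cons.mp hp with rfl | hp
              · have hgc' : m.get? a = some c := hgc
                rw [hm] at hgc'
                simp at hgc'
              · by_cases hpa : p.1 = a
                · rw [hpa, hm] at hgc
                  simp at hgc
                · exact hc p hp c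
                    (by rw [PySem.Dict.get?_insert_of_ne m b hpa]; exact hgc)
            · rintro p hp q hq he
              rcases List.mem_cons.mp hp with rfl | hp <;>
                rcases List.mem_cons.mp hq with rfl | hq
              · rfl
              · have ha : a = q.1 := he
                exact show b = q.2 from
                  hc q hq b (by rw [← ha, PySem.Dict.get?_insert_self])
              · have ha : p.1 = a := he
                exact show p.2 = b from
                  (hc p hp b (by rw [ha, PySem.Dict.get?_insert_self])).symm
              · exact hf p hp q hq he
          · rintro ⟨hc, hf⟩
            constructor
            · rintro p hp c hgc
              by_cases hpa : p.1 = a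
              · rw [hpa, PySem.Dict.get?_insert_self] at hgc
                injection hgc with h
                subst h
                exact hf (a, b) List.mem_cons_self p (List.mem_cons_of_mem _ hp) hpa.symm
              · exact hc p (List.mem_cons_of_mem _ hp) c
                  (by rw [PySem.Dict.get?_insert_of_ne m b hpa] at hgc; exact hgc)
            · intro p hp q hq he
              exact hf p (List.mem_cons_of_mem _ hp) q (List.mem_cons_of_mem _ hq) he

-- cardinality: #distinct pairs = #distinct sources ↔ the pair list is functional
theorem card_eq_iff_pairFun (zs : List (Char × Char)) :
    ((PySem.Set.ofList zs).length = (PySem.Set.ofList (zs.map Prod.fst)).length) ↔ PairFun zs := by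
  have h1 : (PySem.Set.ofList zs).length = zs.toFinset.card := by
    rw [← PySem.List.dedup_eq_ofList]
    have hmem : (PySem.List.dedup zs).toFinset = zs.toFinset := by
      ext x; simp
    rw [← List.toFinset_card_of_nodup (PySem.List.nodup_dedup zs), hmem]
  have h2 : (PySem.Set.ofList (zs.map Prod.fst)).length = (zs.map Prod.fst).toFinset.card := by
    rw [← PySem.List.dedup_eq_ofList]
    have hmem : (PySem.List.dedup (zs.map Prod.fst)).toFinset = (zs.map Prod.fst).toFinset := by
      ext x; simp
    rw [← List.toFinset_card_of_nodup (PySem.List.nodup_dedup (zs.map Prod.fst)), hmem]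
  have h3 : (zs.map Prod.fst).toFinset = zs.toFinset.image Prod.fst := by
    ext x; simp
  rw [h1, h2, h3, eq_comm, Finset.card_image_iff]
  constructor
  · intro hinj p hp q hq he
    have := hinj (by simpa using hp) (by simpa using hq) he
    exact congrArg Prod.snd this
  · intro hf x hx y hy he
    simp at hx hy
    exact Prod.ext he (hf x hx y hy he)

theorem is_half_isomorphic_eq_alt (s1 s2 : String) :
    is_half_isomorphic s1 s2 = is_half_isomorphic_alt s1 s2 := by
  unfold is_half_isomorphic is_half_isomorphic_alt
  by_cases hlen : PySem.Str.len s1 ≠ PySem.Str.len s2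
  · rw [if_pos hlen, if_pos hlen]
  · rw [if_neg hlen, if_neg hlen]
    rw [ne_eq, not_not] at hlen
    have hl : s1.toList.length = s2.toList.length := by
      simp [PySem.Str.len] at hlen
      exact_mod_cast hlen
    have hmap : (s1.toList.zip s2.toList).map Prod.fst = s1.toList :=
      List.map_fst_zip (le_of_eq hl)
    rw [Bool.eq_iff_iff, isHalfLoopA_iff, beq_iff_eq]
    constructor
    · rintro ⟨-, hf⟩
      have hcard := (card_eq_iff_pairFun _).mpr hf
      rw [hmap] at hcard
      simpa [PySem.Set.len] using congrArg Int.ofNat hcard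
    · intro h
      refine ⟨by intro p _ c hgc; simp [PySem.Dict.get?_empty] at hgc, ?_⟩
      apply (card_eq_iff_pairFun _).mp
      rw [hmap]
      simpa [PySem.Set.len] using h

-- ===== VERDICT (by name: the statement is the Claim_ definition above) =====
theorem is_half_isomorphic_spec : Claim_equal_is_half_isomorphic := by
  intro s1 s2 _
  exact is_half_isomorphic_eq_alt s1 s2
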